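-- pv_equiv track=rewrite | github.com/gsongsong/programming_challenges | hackerrank/algorithms/strings/super_reduced_string.py | reduce_helper
-- ===== SOURCE A (Python) =====
-- def reduce_helper(s):
--     if not s:
--         return ''
--
--     reduced = ''
--     c_curr = s[0]
--     len_c = 1
--     for c in s[1:]:
--         if c == c_curr:
--             len_c ^= 1
--             continue
--
--         reduced += c_curr * len_c
--         c_curr = c
--         len_c = 1
--     reduced += c_curr * len_c
--     return reduced
-- ===== SOURCE B (Python) =====
-- def reduce_helper(s):
--     out = []
--     i = 0
--     n = len(s)
--     while i < n:
--         if i + 1 < n and s[i] == s[i + 1]: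
--             i += 2
--         else:
--             out.append(s[i])
--             i += 1
--     return ''.join(out)
-- ===== Notes on version B (the rewrite author's own statement) =====
-- stated objective: simpler
-- what changed: Replaces A's run-tracking state machine (current run char plus XOR parity toggle, emitting each run at its end) by a stateless greedy pass that cancels adjacent equal pairs: an index advances by 2 over each equal pair and otherwise emits the character, joining once at the end.
import Mathlib
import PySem

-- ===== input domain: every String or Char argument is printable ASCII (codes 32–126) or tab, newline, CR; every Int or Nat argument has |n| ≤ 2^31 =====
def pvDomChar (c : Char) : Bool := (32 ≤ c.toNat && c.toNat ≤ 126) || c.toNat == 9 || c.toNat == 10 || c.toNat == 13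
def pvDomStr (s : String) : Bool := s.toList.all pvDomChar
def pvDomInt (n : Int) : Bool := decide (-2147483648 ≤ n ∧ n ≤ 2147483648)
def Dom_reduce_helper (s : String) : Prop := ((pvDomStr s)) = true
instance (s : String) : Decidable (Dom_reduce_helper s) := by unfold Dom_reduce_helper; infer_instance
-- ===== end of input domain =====

-- B replaces A's run-tracking parity-toggle state machine by a stateless greedy pass cancelling adjacent equal pairs (simpler; return-value equivalence).


-- ===== PORT A =====
-- A's for-loop over s[1:], carrying (reduced, c_curr, len_c); len_c toggles with ^ 1 on equal chars.
def reduceLoopA (reduced : List Char) (c_curr : Char) (len_c : Nat) : List Char → List Char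
  | [] => reduced ++ List.replicate len_c c_curr
  | c :: rest =>
    if c == c_curr then reduceLoopA reduced c_curr (len_c ^^^ 1) rest
    else reduceLoopA (reduced ++ List.replicate len_c c_curr) c 1 rest

def reduce_helper (s : String) : String :=
  match s.toList with
  | [] => ""
  | c :: rest => String.ofList (reduceLoopA [] c 1 rest)

-- ===== PORT B =====
-- Source B's while loop over index i: a pair s[i] == s[i+1] is skipped (i += 2), otherwise s[i] is emitted (i += 1);
-- as structural recursion the suffix from i is [], [c], or c :: d :: t.
def skipPairs : List Char → List Char
  | [] => []
  | [c] => [c]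
  | c :: d :: t => if c == d then skipPairs t else c :: skipPairs (d :: t)

def reduce_helper_alt (s : String) : String :=
  String.ofList (skipPairs s.toList)

-- ===== PRECONDITION & SPEC =====
def Spec_reduce_helper (s : String) (out : String) : Prop := out = reduce_helper_alt s
instance (s : String) (out : String) : Decidable (Spec_reduce_helper s out) := by unfold Spec_reduce_helper; infer_instance

-- ===== CLAIM (what is proved, stated in full; the proofs are below) =====
def Claim_equal_reduce_helper : Prop := ∀ (s : String), Dom_reduce_helper s → Spec_reduce_helper s (reduce_helper s)

-- ===== LEMMAS AND PROOFS =====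
-- Invariant: A's loop with pending parity m % 2 of the current run equals greedy pair-skipping
-- applied to the pending replicated characters followed by the unread suffix.
theorem reduceLoopA_skipPairs (l : List Char) :
    ∀ (red : List Char) (c : Char) (m : Nat),
    reduceLoopA red c (m % 2) l = red ++ skipPairs (List.replicate (m % 2) c ++ l) := by
  induction l with
  | nil =>
    intro red c m
    rcases Nat.mod_two_eq_zero_or_one m with h | h <;> simp [h, reduceLoopA, skipPairs]
  | cons d rest ih =>
    intro red c m
    simp only [reduceLoopA]
    by_cases h : d == c
    · have hc : d = c := by exact eq_of_beq h
      subst hc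
      simp only [h, if_true]
      have htog : m % 2 ^^^ 1 = (m + 1) % 2 := by
        rcases Nat.mod_two_eq_zero_or_one m with hm | hm
        · rw [hm, show (m + 1) % 2 = 1 by omega]; rfl
        · rw [hm, show (m + 1) % 2 = 0 by omega]; rfl
      rw [htog, ih red d (m + 1)]
      rcases Nat.mod_two_eq_zero_or_one m with hm | hm
      · have : (m + 1) % 2 = 1 := by omega
        simp [hm, this]
      · have : (m + 1) % 2 = 0 := by omega
        simp [hm, this, skipPairs]
    · simp only [h, Bool.false_eq_true, if_false]
      have h1 : (1 : Nat) = 1 % 2 := rfl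
      rw [h1, ih (red ++ List.replicate (m % 2) c) d 1]
      rcases Nat.mod_two_eq_zero_or_one m with hm | hm
      · simp [hm, List.replicate]
      · have hcd : (c == d) = false := by
          simp only [beq_iff_eq] at h
          exact beq_eq_false_iff_ne.mpr (fun e => h (Eq.symm e))
        simp [hm, List.replicate, skipPairs, hcd]

-- ===== VERDICT (by name: the statement is the Claim_ definition above) =====
theorem reduce_helper_spec : Claim_equal_reduce_helper := by
  intro s _
  unfold Spec_reduce_helper reduce_helper reduce_helper_alt
  cases h : s.toList with
  | nil => rfl
  | cons c rest =>
    show String.ofList (reduceLoopA [] c 1 rest) = String.ofList (skipPairs (c :: rest))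
    have h1 : (1 : Nat) = 1 % 2 := rfl
    rw [h1, reduceLoopA_skipPairs rest [] c 1]
    simp [List.replicate]
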